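-- pv_equiv track=rewrite | github.com/exo7math/python2-exo7 | recursivite/recursivite_4.py | produit
-- ===== SOURCE A (Python) =====
-- def produit(a,b):
--     """ Produit des éléments : a(a+1)(a+2)...(b-2)(b-1) """
--     if b==a:
--         return 1
--     if b==a+1:
--         return a
--
--     # Cas général
--     k = b-a
--     Pgauche =  produit(a,a+k//2)
--     Pdroite = produit(a+k//2,b)
--     P = Pgauche*Pdroite
--     return P
-- ===== SOURCE B (Python) =====
-- def produit(a, b):
--     """ Produit des éléments : a(a+1)(a+2)...(b-2)(b-1) """
--     P = 1
--     for i in range(a, b):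
--         P *= i
--     return P
-- ===== Notes on version B (the rewrite author's own statement) =====
-- stated objective: simpler
-- what changed: Replaces the divide-and-conquer recursion by a single left-to-right running product over range(a,b).
import Mathlib
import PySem

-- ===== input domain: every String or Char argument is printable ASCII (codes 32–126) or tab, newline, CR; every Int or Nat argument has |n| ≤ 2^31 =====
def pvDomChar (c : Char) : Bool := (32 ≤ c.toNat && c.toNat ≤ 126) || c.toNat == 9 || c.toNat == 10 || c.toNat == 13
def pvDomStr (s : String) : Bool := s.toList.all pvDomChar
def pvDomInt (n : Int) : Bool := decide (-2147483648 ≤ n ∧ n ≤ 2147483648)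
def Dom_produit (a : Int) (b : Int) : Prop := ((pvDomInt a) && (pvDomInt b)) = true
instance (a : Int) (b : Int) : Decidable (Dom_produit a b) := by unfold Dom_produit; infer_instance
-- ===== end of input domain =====

-- B replaces A's divide-and-conquer recursion by a single running product over range(a,b); same values for a ≤ b.


-- ===== PORT A =====
-- A's recursion does not terminate for b < a (Python: RecursionError); the fuel only
-- makes the same computation total — with fuel (b-a).toNat + 1 it never runs out on a ≤ b.
def produitFuel : Nat → Int → Int → Int
  | 0, _, _ => 0
  | fuel + 1, a, b =>
    if b = a then 1
    else if b = a + 1 then a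
    else
      let k := b - a
      let pgauche := produitFuel fuel a (a + PySem.Int.floordiv k 2)
      let pdroite := produitFuel fuel (a + PySem.Int.floordiv k 2) b
      pgauche * pdroite

def produit (a : Int) (b : Int) : Int := produitFuel ((b - a).toNat + 1) a b

-- ===== PORT B =====
def produit_alt (a : Int) (b : Int) : Int :=
  (PySem.List.pyRange a b 1).foldl (fun p i => p * i) 1

-- ===== PRECONDITION & SPEC =====
-- Pre_ excludes b < a, on which A's recursion never reaches a base case and raises RecursionError.
def Pre_produit (a : Int) (b : Int) : Prop := a ≤ b
instance (a : Int) (b : Int) : Decidable (Pre_produit a b) := by unfold Pre_produit; infer_instance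
def pvWitness_produit : Int × Int := (3, 7)

def Spec_produit (a : Int) (b : Int) (out : Int) : Prop := out = produit_alt a b
instance (a : Int) (b : Int) (out : Int) : Decidable (Spec_produit a b out) := by unfold Spec_produit; infer_instance

-- ===== CLAIM (what is proved, stated in full; the proofs are below) =====
def Claim_equal_produit : Prop := ∀ (a : Int) (b : Int), Dom_produit a b → Pre_produit a b → Spec_produit a b (produit a b)

-- ===== LEMMAS AND PROOFS =====

theorem produit_alt_eq_prod (a b : Int) :
    produit_alt a b = (PySem.List.pyRange a b 1).prod := by
  simp [produit_alt, List.prod_eq_foldl]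

theorem alt_split (a m b : Int) (h1 : a ≤ m) (h2 : m ≤ b) :
    produit_alt a b = produit_alt a m * produit_alt m b := by
  rw [produit_alt_eq_prod, produit_alt_eq_prod, produit_alt_eq_prod,
    PySem.List.pyRange_one_append a m b h1 h2, List.prod_append]

theorem alt_empty (a b : Int) (h : b ≤ a) : produit_alt a b = 1 := by
  rw [produit_alt_eq_prod, PySem.List.pyRange_one_eq_nil h]; rfl

theorem alt_single (a : Int) : produit_alt a (a + 1) = a := by
  rw [produit_alt_eq_prod, PySem.List.pyRange_one_singleton]; simp

theorem produitFuel_eq (fuel : Nat) (a b : Int) (hab : a ≤ b)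
    (hf : (b - a).toNat < fuel) : produitFuel fuel a b = produit_alt a b := by
  induction fuel generalizing a b with
  | zero => omega
  | succ n ih =>
    by_cases h1 : b = a
    · subst h1; simp [produitFuel, alt_empty b b le_rfl]
    · by_cases h2 : b = a + 1
      · subst h2; simp [produitFuel, alt_single]
      · have hk : 2 ≤ b - a := by omega
        have hfd : PySem.Int.floordiv (b - a) 2 = (b - a) / 2 :=
          PySem.Int.floordiv_eq_ediv_of_pos (by omega)
        have hm1 : a ≤ a + PySem.Int.floordiv (b - a) 2 := by rw [hfd]; omega
        have hm2 : a + PySem.Int.floordiv (b - a) 2 ≤ b := by rw [hfd]; omega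
        have hL : (a + PySem.Int.floordiv (b - a) 2 - a).toNat < n := by rw [hfd]; omega
        have hR : (b - (a + PySem.Int.floordiv (b - a) 2)).toNat < n := by rw [hfd]; omega
        rw [produitFuel, if_neg h1, if_neg h2]
        simp only []
        rw [ih a _ hm1 hL, ih _ b hm2 hR, ← alt_split a _ b hm1 hm2]

-- ===== VERDICT (by name: the statement is the Claim_ definition above) =====
theorem produit_spec : Claim_equal_produit := by
  intro a b _ hpre
  unfold Spec_produit produit
  exact produitFuel_eq _ a b hpre (by omega)
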